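-- pv_equiv track=rewrite | github.com/ishansm/lpcrm | query.py | _find_lp
-- ===== SOURCE A (Python) =====
-- def _find_lp(profiles, query):
--     q = query.lower().strip()
--     for lp in profiles:
--         if lp["name"].lower() == q:
--             return lp
--     for lp in profiles:
--         if q in lp["name"].lower():
--             return lp
--     return None
-- ===== SOURCE B (Python) =====
-- def _find_lp(profiles, query):
--     q = query.lower().strip()
--     fallback = None
--     for lp in profiles:
--         name = lp["name"].lower()
--         if name == q:
--             return lp
--         if fallback is None and q in name:
--             fallback = lp
--     return fallback
-- ===== Notes on version B (the rewrite author's own statement) =====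
-- stated objective: alternative
-- what changed: A scans the profile list twice (one full pass for an exact lowercase-name match, then a second pass for a substring match); B makes a single pass that returns immediately on an exact match while remembering the first substring match in a fallback variable returned after the loop.
import Mathlib
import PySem

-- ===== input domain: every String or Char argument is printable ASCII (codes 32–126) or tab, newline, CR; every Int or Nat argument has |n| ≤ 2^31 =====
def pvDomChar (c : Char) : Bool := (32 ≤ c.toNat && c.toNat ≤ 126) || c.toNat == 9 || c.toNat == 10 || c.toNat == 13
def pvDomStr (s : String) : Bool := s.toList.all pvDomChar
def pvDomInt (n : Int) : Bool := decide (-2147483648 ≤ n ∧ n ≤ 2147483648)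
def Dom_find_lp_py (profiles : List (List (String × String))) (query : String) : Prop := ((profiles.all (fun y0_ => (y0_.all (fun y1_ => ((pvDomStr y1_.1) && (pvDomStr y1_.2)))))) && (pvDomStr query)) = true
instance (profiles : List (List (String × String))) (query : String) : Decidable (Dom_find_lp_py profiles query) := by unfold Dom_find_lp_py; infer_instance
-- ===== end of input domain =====

-- B merges A's two sequential scans into one pass with a maintained fallback (alternative decomposition, same result).

-- lp["name"] (Pre_ guarantees the key exists, so the getD default is never used)
def pvName (lp : List (String × String)) : String :=
  ((PySem.Dict.mk lp).get? "name").getD ""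

-- ===== PORT A =====
-- first loop of A: first lp with lp["name"].lower() == q
def pvScanExact (q : String) : List (List (String × String)) → Option (List (String × String))
  | [] => none
  | lp :: rest =>
      if PySem.Str.lower (pvName lp) == q then some lp else pvScanExact q rest

-- second loop of A: first lp with q in lp["name"].lower()
def pvScanSub (q : String) : List (List (String × String)) → Option (List (String × String))
  | [] => none
  | lp :: rest =>
      if PySem.Str.isIn q (PySem.Str.lower (pvName lp)) then some lp else pvScanSub q rest

def find_lp_py (profiles : List (List (String × String))) (query : String) : Option (List (String × String)) :=
  let q := PySem.Str.strip (PySem.Str.lower query)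
  match pvScanExact q profiles with
  | some lp => some lp
  | none => pvScanSub q profiles

-- ===== PORT B =====
-- B's single loop, carrying the fallback
def pvScanFB (q : String) (fb : Option (List (String × String))) :
    List (List (String × String)) → Option (List (String × String))
  | [] => fb
  | lp :: rest =>
      let name := PySem.Str.lower (pvName lp)
      if name == q then some lp
      else if fb.isNone && PySem.Str.isIn q name then pvScanFB q (some lp) rest
      else pvScanFB q fb rest

def find_lp_py_alt (profiles : List (List (String × String))) (query : String) : Option (List (String × String)) :=
  let q := PySem.Str.strip (PySem.Str.lower query)
  pvScanFB q none profiles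

-- ===== PRECONDITION & SPEC =====
-- Pre_ excludes exactly the inputs where Python A raises KeyError: a profile without a "name" key
-- that is not preceded by a profile whose lowered name equals the stripped lowered query (an exact
-- match makes A return before reaching the nameless profile).
def Pre_find_lp_py (profiles : List (List (String × String))) (query : String) : Prop :=
  ∀ i : Fin profiles.length, (PySem.Dict.mk profiles[i]).contains "name" = true ∨
    ∃ j : Fin profiles.length, j < i ∧
      PySem.Str.lower (pvName profiles[j]) = PySem.Str.strip (PySem.Str.lower query)
instance (profiles : List (List (String × String))) (query : String) : Decidable (Pre_find_lp_py profiles query) := by unfold Pre_find_lp_py; infer_instance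

def pvWitness_find_lp_py : (List (List (String × String))) × String :=
  ([[("name", "Alice")], [("name", "Bob")]], "ali")

def Spec_find_lp_py (profiles : List (List (String × String))) (query : String) (out : Option (List (String × String))) : Prop := out = find_lp_py_alt profiles query
instance (profiles : List (List (String × String))) (query : String) (out : Option (List (String × String))) : Decidable (Spec_find_lp_py profiles query out) := by unfold Spec_find_lp_py; infer_instance

-- ===== CLAIM (what is proved, stated in full; the proofs are below) =====
def Claim_equal_find_lp_py : Prop := ∀ (profiles : List (List (String × String))) (query : String), Dom_find_lp_py profiles query → Pre_find_lp_py profiles query → Spec_find_lp_py profiles query (find_lp_py profiles query)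

-- ===== LEMMAS AND PROOFS =====

-- the fallback loop computes: exact match if any, else the carried fallback if set, else the substring match
theorem pvScanFB_eq (q : String) (ps : List (List (String × String))) :
    ∀ fb, pvScanFB q fb ps =
      match pvScanExact q ps with
      | some lp => some lp
      | none => match fb with
        | some x => some x
        | none => pvScanSub q ps := by
  induction ps with
  | nil => intro fb; cases fb <;> rfl
  | cons lp rest ih =>
    intro fb
    by_cases hx : (PySem.Str.lower (pvName lp) == q) = true
    · simp [pvScanFB, pvScanExact, hx]
    · cases fb with
      | some x =>
        simp [pvScanFB, pvScanExact, hx, ih]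
      | none =>
        simp only [pvScanFB, pvScanExact, pvScanSub, hx, ih, if_false, Bool.false_eq_true,
          Option.isNone_none, Bool.true_and]
        cases pvScanExact q rest <;> split <;> simp_all

-- ===== VERDICT (by name: the statement is the Claim_ definition above) =====
theorem find_lp_py_spec : Claim_equal_find_lp_py := by
  intro profiles query _ _
  unfold Spec_find_lp_py find_lp_py find_lp_py_alt
  rw [pvScanFB_eq]
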